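-- pv_equiv track=rewrite | github.com/Thrystan01204/maze_generator | maze_list_2d.py | all_walls
-- ===== SOURCE A (Python) =====
-- def all_walls(r_walls, c_walls):
--     walls = []
--     idx = 0
--     for row in r_walls:
--         for current_idx in range(len(row)):
--             walls.append(f"r{current_idx + idx}")
--         idx += len(row)
--     idx = 0
--     for row in c_walls:
--         for current_idx in range(len(row)):
--             walls.append(f"c{current_idx + idx}")
--         idx += len(row)
--     return walls
-- ===== SOURCE B (Python) =====
-- def all_walls(r_walls, c_walls):
--     r_count = sum(len(row) for row in r_walls)
--     c_count = sum(len(row) for row in c_walls)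
--     return [f"r{i}" for i in range(r_count)] + [f"c{i}" for i in range(c_count)]
-- ===== Notes on version B (the rewrite author's own statement) =====
-- stated objective: simpler
-- what changed: Replaces the two nested index-accumulating loops with a count-first decomposition: sum the row lengths once, then emit each labeled list as a single flat comprehension over range(count).
import Mathlib
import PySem

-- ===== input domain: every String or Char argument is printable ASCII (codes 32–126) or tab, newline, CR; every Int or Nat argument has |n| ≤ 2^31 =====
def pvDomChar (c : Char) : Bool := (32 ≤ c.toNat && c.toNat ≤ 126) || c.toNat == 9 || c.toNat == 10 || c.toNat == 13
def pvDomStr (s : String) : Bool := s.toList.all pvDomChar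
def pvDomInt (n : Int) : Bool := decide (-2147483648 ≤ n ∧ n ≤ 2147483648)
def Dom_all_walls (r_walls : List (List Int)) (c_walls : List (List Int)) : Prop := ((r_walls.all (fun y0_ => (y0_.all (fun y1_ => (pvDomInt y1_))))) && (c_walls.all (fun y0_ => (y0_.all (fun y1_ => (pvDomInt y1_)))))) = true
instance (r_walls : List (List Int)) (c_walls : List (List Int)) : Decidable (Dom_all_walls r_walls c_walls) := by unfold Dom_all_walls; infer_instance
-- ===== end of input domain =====

-- B replaces A's nested index-accumulating loops by summing the row lengths first and
-- emitting each labeled list as one flat map over a single range (objective: simpler).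


-- ===== PORT A =====
def all_walls (r_walls : List (List Int)) (c_walls : List (List Int)) : List String :=
  -- walls = []; idx = 0; first loop over r_walls
  let st1 : List String × Int := r_walls.foldl
    (fun (st : List String × Int) row =>
      ((PySem.List.pyRange 0 (row.length : Int)).foldl
          (fun w ci => w ++ ["r" ++ PySem.Int.toStr (ci + st.2)]) st.1,
       st.2 + (row.length : Int)))
    ([], 0)
  -- idx = 0; second loop over c_walls
  let st2 : List String × Int := c_walls.foldl
    (fun (st : List String × Int) row =>
      ((PySem.List.pyRange 0 (row.length : Int)).foldl
          (fun w ci => w ++ ["c" ++ PySem.Int.toStr (ci + st.2)]) st.1,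
       st.2 + (row.length : Int)))
    (st1.1, 0)
  st2.1

-- ===== PORT B =====
def all_walls_alt (r_walls : List (List Int)) (c_walls : List (List Int)) : List String :=
  let r_count : Nat := (r_walls.map List.length).sum
  let c_count : Nat := (c_walls.map List.length).sum
  (PySem.List.pyRange 0 (r_count : Int)).map (fun i => "r" ++ PySem.Int.toStr i)
    ++ (PySem.List.pyRange 0 (c_count : Int)).map (fun i => "c" ++ PySem.Int.toStr i)

-- ===== PRECONDITION & SPEC =====
def Spec_all_walls (r_walls : List (List Int)) (c_walls : List (List Int)) (out : List String) : Prop := out = all_walls_alt r_walls c_walls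
instance (r_walls : List (List Int)) (c_walls : List (List Int)) (out : List String) : Decidable (Spec_all_walls r_walls c_walls out) := by unfold Spec_all_walls; infer_instance

-- ===== CLAIM (what is proved, stated in full; the proofs are below) =====
def Claim_equal_all_walls : Prop := ∀ (r_walls : List (List Int)) (c_walls : List (List Int)), Dom_all_walls r_walls c_walls → Spec_all_walls r_walls c_walls (all_walls r_walls c_walls)

-- ===== LEMMAS AND PROOFS =====

-- A's one labeled pass, started at accumulator `acc` and running index `n`, appends
-- exactly `f` applied to the `total` consecutive indices n, n+1, …, and ends at n + total.
theorem pass_eq (f : Int → String) (rows : List (List Int)) (acc : List String) (n : Nat) :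
    rows.foldl
      (fun (st : List String × Int) row =>
        ((PySem.List.pyRange 0 (row.length : Int)).foldl
            (fun w ci => w ++ [f (ci + st.2)]) st.1,
         st.2 + (row.length : Int)))
      (acc, (n : Int))
    = (acc ++ (List.range ((rows.map List.length).sum)).map (fun k => f (((n + k : Nat)) : Int)),
       ((n + (rows.map List.length).sum : Nat) : Int)) := by
  induction rows generalizing acc n with
  | nil => simp
  | cons row rows ih =>
    simp only [List.foldl_cons]
    rw [PySem.List.foldl_append_singleton_eq_map (fun ci => f (ci + (n : Int)))]
    rw [PySem.List.pyRange_zero_natCast, List.map_map]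
    have : ((n : Int) + (row.length : Int)) = ((n + row.length : Nat) : Int) := by push_cast; ring
    rw [this, ih]
    simp only [Prod.mk.injEq, List.map_cons, List.sum_cons, List.range_add,
      List.map_append, List.map_map, List.append_assoc]
    refine ⟨?_, by congr 1; omega⟩
    congr 1
    congr 1
    · apply List.map_congr_left; intro k _
      simp only [Function.comp_apply]; congr 1; push_cast; ring
    · apply List.map_congr_left; intro k _
      simp only [Function.comp_apply]; congr 1; omega

-- A pass started at index 0: the initial state as it appears in the ports.
theorem pass_eq0 (f : Int → String) (rows : List (List Int)) (acc : List String) :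
    rows.foldl
      (fun (st : List String × Int) row =>
        ((PySem.List.pyRange 0 (row.length : Int)).foldl
            (fun w ci => w ++ [f (ci + st.2)]) st.1,
         st.2 + (row.length : Int)))
      (acc, 0)
    = (acc ++ (List.range ((rows.map List.length).sum)).map (fun k => f ((k : Nat) : Int)),
       (((rows.map List.length).sum : Nat) : Int)) := by
  have h := pass_eq f rows acc 0
  simpa using h

-- ===== VERDICT (by name: the statement is the Claim_ definition above) =====
theorem all_walls_spec : Claim_equal_all_walls := by
  intro r_walls c_walls _
  show all_walls r_walls c_walls = all_walls_alt r_walls c_walls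
  unfold all_walls all_walls_alt
  dsimp only
  rw [pass_eq0 (fun i => "r" ++ PySem.Int.toStr i) r_walls []]
  rw [pass_eq0 (fun i => "c" ++ PySem.Int.toStr i) c_walls _]
  rw [PySem.List.pyRange_zero_natCast, PySem.List.pyRange_zero_natCast]
  simp [List.map_map, Function.comp_def]
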